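-- pv_equiv track=rewrite | github.com/lossme/ComicBook | onepiece/utils/__init__.py | parser_chapter_str
-- ===== SOURCE A (Python) =====
-- def parser_chapter_str(chapter_str, last_chapter_number, is_all=None):
--     """将字符串描述的区间转化为一个一个数字
--     :param str chapter: 类似 1-10,20-30,66 这样的字符串
--     :return list number_list: [1, 2, 3, 4, ...]
--     """
--     if is_all:
--         return list(range(1, last_chapter_number + 1))
--
--     try:
--         chapter_number = int(chapter_str)
--         if chapter_number < 0:
--             chapter_number = last_chapter_number + chapter_number + 1
--         return [chapter_number, ]
--     except ValueError:
--         pass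
--
--     appeared = set()
--     chapter_number_list = []
--     for block in chapter_str.split(','):
--         if '-' in block:
--             start, end = block.split('-', 1)
--             start, end = int(start), int(end)
--             for number in range(start, end + 1):
--                 if number not in appeared:
--                     appeared.add(number)
--                     chapter_number_list.append(number)
--         else:
--             number = int(block)
--             if number not in appeared:
--                 appeared.add(number)
--                 chapter_number_list.append(number)
--     return chapter_number_list
-- ===== SOURCE B (Python) =====
-- def parser_chapter_str(chapter_str, last_chapter_number, is_all=None):
--     if is_all:
--         return list(range(1, last_chapter_number + 1))
--
--     try:
--         chapter_number = int(chapter_str)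
--         if chapter_number < 0:
--             chapter_number = last_chapter_number + chapter_number + 1
--         return [chapter_number]
--     except ValueError:
--         pass
--
--     # Pass 1: parse every block into an inclusive interval (a single number n is (n, n)).
--     intervals = []
--     for block in chapter_str.split(','):
--         if '-' in block:
--             start, end = block.split('-', 1)
--             intervals.append((int(start), int(end)))
--         else:
--             n = int(block)
--             intervals.append((n, n))
--
--     # Pass 2: emit each interval's numbers, skipping any number covered by an earlier interval.
--     result = []
--     for k, (lo, hi) in enumerate(intervals):
--         for number in range(lo, hi + 1):
--             if not any(a <= number <= b for a, b in intervals[:k]):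
--                 result.append(number)
--     return result
-- ===== Notes on version B (the rewrite author's own statement) =====
-- stated objective: alternative
-- what changed: A's single pass with a seen-set guarding each append is replaced by a two-phase interval algorithm: parse every comma block into an inclusive (lo, hi) interval first, then emit each interval's numbers, skipping a number exactly when some earlier interval covers it -- no set of visited numbers is ever materialized.
import Mathlib
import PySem

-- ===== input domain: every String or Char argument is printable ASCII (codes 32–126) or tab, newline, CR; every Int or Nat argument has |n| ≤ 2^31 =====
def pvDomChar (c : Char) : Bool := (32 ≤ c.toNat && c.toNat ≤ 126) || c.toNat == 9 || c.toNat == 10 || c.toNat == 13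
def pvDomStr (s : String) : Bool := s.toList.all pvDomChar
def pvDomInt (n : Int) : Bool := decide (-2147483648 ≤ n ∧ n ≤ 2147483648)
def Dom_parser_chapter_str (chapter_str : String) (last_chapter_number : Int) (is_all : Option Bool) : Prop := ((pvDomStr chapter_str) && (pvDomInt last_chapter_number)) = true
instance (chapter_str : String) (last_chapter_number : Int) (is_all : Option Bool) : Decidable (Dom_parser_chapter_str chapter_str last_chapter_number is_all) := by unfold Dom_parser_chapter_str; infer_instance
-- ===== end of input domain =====

-- B replaces A's interleaved seen-set single pass by a different algorithm: parse every block
-- into an inclusive interval first, then emit each interval's numbers, skipping a number iff it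
-- is covered by some EARLIER interval (no set of visited numbers is ever materialized).

-- ===== PORT A =====
-- the numbers a '-'-containing block contributes: range(int(start), int(end)+1)
-- (int() failures are excluded by Pre_; .getD 0 marks where Python would have raised ValueError)
def pvBlockRange (block : String) : List Int :=
  let parts := (PySem.Str.splitMax? block "-" 1).getD []
  let s := (PySem.Int.ofStr? (parts.getD 0 "")).getD 0
  let e := (PySem.Int.ofStr? (parts.getD 1 "")).getD 0
  PySem.List.pyRange s (e + 1) 1

-- A's inner per-number step: membership-guarded add to the seen set and append to the list
def pvAStep (st : PySem.Set Int × List Int) (number : Int) : PySem.Set Int × List Int :=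
  if PySem.Set.contains st.1 number then st
  else (PySem.Set.add st.1 number, st.2 ++ [number])

def parser_chapter_str (chapter_str : String) (last_chapter_number : Int) (is_all : Option Bool) : List Int :=
  if is_all = some true then
    PySem.List.pyRange 1 (last_chapter_number + 1) 1
  else
    match PySem.Int.ofStr? chapter_str with
    | some chapter_number =>
        [if chapter_number < 0 then last_chapter_number + chapter_number + 1 else chapter_number]
    | none =>
        let st := (((PySem.Str.split? chapter_str ",").getD [])).foldl
          (fun st block =>
            if PySem.Str.isIn "-" block then
              (pvBlockRange block).foldl pvAStep st
            else
              pvAStep st ((PySem.Int.ofStr? block).getD 0))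
          (PySem.Set.empty, [])
        st.2

-- ===== PORT B =====
-- a block's inclusive interval: 'a-b' → (a, b), a single number n → (n, n)
def pvBlockInterval (block : String) : Int × Int :=
  if PySem.Str.isIn "-" block then
    let parts := (PySem.Str.splitMax? block "-" 1).getD []
    (((PySem.Int.ofStr? (parts.getD 0 "")).getD 0), ((PySem.Int.ofStr? (parts.getD 1 "")).getD 0))
  else
    let n := (PySem.Int.ofStr? block).getD 0
    (n, n)

-- any(a <= number <= b for a, b in intervals)
def pvCovered (intervals : List (Int × Int)) (x : Int) : Bool :=
  intervals.any (fun p => decide (p.1 ≤ x) && decide (x ≤ p.2))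

def parser_chapter_str_alt (chapter_str : String) (last_chapter_number : Int) (is_all : Option Bool) : List Int :=
  if is_all = some true then
    PySem.List.pyRange 1 (last_chapter_number + 1) 1
  else
    match PySem.Int.ofStr? chapter_str with
    | some chapter_number =>
        [if chapter_number < 0 then last_chapter_number + chapter_number + 1 else chapter_number]
    | none =>
        let intervals := (((PySem.Str.split? chapter_str ",").getD [])).foldl
          (fun acc block => acc ++ [pvBlockInterval block]) []
        (PySem.List.enumerate intervals).foldl
          (fun res kp =>
            (PySem.List.pyRange kp.2.1 (kp.2.2 + 1) 1).foldl
              (fun r n => if !pvCovered (intervals.take kp.1.toNat) n then r ++ [n] else r) res)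
          []

-- ===== PRECONDITION & SPEC =====
-- Pre_ excludes exactly the inputs on which A raises ValueError: a non-int chapter_str
-- (with is_all not truthy) containing a comma block that is neither an int nor
-- 'int-int' after splitting at the first '-'. B raises there too.
def pvBlockOK (block : String) : Bool :=
  if PySem.Str.isIn "-" block then
    let parts := (PySem.Str.splitMax? block "-" 1).getD []
    (PySem.Int.ofStr? (parts.getD 0 "")).isSome && (PySem.Int.ofStr? (parts.getD 1 "")).isSome
  else
    (PySem.Int.ofStr? block).isSome

def Pre_parser_chapter_str (chapter_str : String) (last_chapter_number : Int) (is_all : Option Bool) : Prop :=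
  is_all = some true ∨ (PySem.Int.ofStr? chapter_str).isSome = true ∨
    (((PySem.Str.split? chapter_str ",").getD [])).all pvBlockOK = true
instance (chapter_str : String) (last_chapter_number : Int) (is_all : Option Bool) : Decidable (Pre_parser_chapter_str chapter_str last_chapter_number is_all) := by unfold Pre_parser_chapter_str; infer_instance

def pvWitness_parser_chapter_str : String × Int × Option Bool := ("1-4,3,2-5", 10, none)

def Spec_parser_chapter_str (chapter_str : String) (last_chapter_number : Int) (is_all : Option Bool) (out : List Int) : Prop := out = parser_chapter_str_alt chapter_str last_chapter_number is_all
instance (chapter_str : String) (last_chapter_number : Int) (is_all : Option Bool) (out : List Int) : Decidable (Spec_parser_chapter_str chapter_str last_chapter_number is_all out) := by unfold Spec_parser_chapter_str; infer_instance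

-- ===== CLAIM (what is proved, stated in full; the proofs are below) =====
def Claim_equal_parser_chapter_str : Prop := ∀ (chapter_str : String) (last_chapter_number : Int) (is_all : Option Bool), Dom_parser_chapter_str chapter_str last_chapter_number is_all → Pre_parser_chapter_str chapter_str last_chapter_number is_all → Spec_parser_chapter_str chapter_str last_chapter_number is_all (parser_chapter_str chapter_str last_chapter_number is_all)

-- ===== LEMMAS AND PROOFS =====

-- common specification both ports are reduced to: emit the numbers of each interval
-- that are covered by no earlier interval
def specGo : List (Int × Int) → List (Int × Int) → List Int
  | _, [] => []
  | P, p :: rest =>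
      (PySem.List.pyRange p.1 (p.2 + 1) 1).filter (fun n => !pvCovered P n)
        ++ specGo (P ++ [p]) rest

theorem covered_append (P : List (Int × Int)) (p : Int × Int) (x : Int) :
    pvCovered (P ++ [p]) x = (pvCovered P x || (decide (p.1 ≤ x) && decide (x ≤ p.2))) := by
  simp [pvCovered]

-- membership in a set after Set.add
theorem contains_add (S : PySem.Set Int) (n x : Int) :
    PySem.Set.contains (PySem.Set.add S n) x = (PySem.Set.contains S x || decide (x = n)) := by
  rw [← Bool.coe_iff_coe]
  simp [PySem.Set.contains_iff, PySem.Set.mem_add]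

-- A's inner fold over a duplicate-free number list: output extends by the not-yet-seen
-- numbers, and the seen set grows by exactly the list's members
theorem innerA (ns : List Int) (hnd : ns.Nodup) (S : PySem.Set Int) (L : List Int) :
    (ns.foldl pvAStep (S, L)).2 = L ++ ns.filter (fun n => !PySem.Set.contains S n)
    ∧ ∀ x, PySem.Set.contains ((ns.foldl pvAStep (S, L)).1) x
            = (PySem.Set.contains S x || decide (x ∈ ns)) := by
  induction ns generalizing S L with
  | nil => simp
  | cons n ns ih =>
      have hn : n ∉ ns := (List.nodup_cons.mp hnd).1
      have hnd' : ns.Nodup := (List.nodup_cons.mp hnd).2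
      by_cases hc : PySem.Set.contains S n = true
      · obtain ⟨ih2, ih1⟩ := ih hnd' S L
        constructor
        · simp only [List.foldl_cons, pvAStep, hc, if_true, ih2, List.filter_cons, hc,
            Bool.not_true]
          simp
        · intro x
          simp only [List.foldl_cons, pvAStep, hc, if_true, ih1 x]
          by_cases hx : x = n
          · subst hx
            simp [(PySem.Set.contains_iff _ _).mp hc]
          · simp [hx]
      · have hc' : PySem.Set.contains S n = false := by simpa using hc
        obtain ⟨ih2, ih1⟩ := ih hnd' (PySem.Set.add S n) (L ++ [n])
        constructor
        · simp only [List.foldl_cons, pvAStep, hc', Bool.false_eq_true, if_false, ih2]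
          rw [List.filter_congr (q := fun m => !PySem.Set.contains S m)
            (by
              intro m hm
              have hmn : m ≠ n := fun h => hn (h ▸ hm)
              simp [hmn])]
          have hnm : n ∉ S := fun hm => hc ((PySem.Set.contains_iff _ _).mpr hm)
          simp [List.filter_cons, hc', hnm]
        · intro x
          simp only [List.foldl_cons, pvAStep, hc', Bool.false_eq_true, if_false, ih1 x,
            contains_add]
          by_cases hx : x = n
          · subst hx
            simp
          · simp [hx]

-- A's outer fold over blocks equals specGo over the blocks' intervals
theorem outerA (blocks : List String) (P : List (Int × Int)) (S : PySem.Set Int) (L : List Int)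
    (hS : ∀ x, PySem.Set.contains S x = pvCovered P x) :
    (blocks.foldl
      (fun st block =>
        if PySem.Str.isIn "-" block then
          (pvBlockRange block).foldl pvAStep st
        else
          pvAStep st ((PySem.Int.ofStr? block).getD 0)) ((S, L) : PySem.Set Int × List Int)).2
    = L ++ specGo P (blocks.map pvBlockInterval) := by
  induction blocks generalizing P S L with
  | nil => simp [specGo]
  | cons b bs ih =>
      -- the block's numbers, in both branches, are the interval's pyRange
      have hstep : (fun (st : PySem.Set Int × List Int) (block : String) =>
          if PySem.Str.isIn "-" block then
            (pvBlockRange block).foldl pvAStep st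
          else
            pvAStep st ((PySem.Int.ofStr? block).getD 0)) (S, L) b
          = (PySem.List.pyRange (pvBlockInterval b).1 ((pvBlockInterval b).2 + 1) 1).foldl
              pvAStep (S, L) := by
        by_cases hb : PySem.Str.isIn "-" b = true
        · have hb2 : PySem.Chars.isIn ['-'] b.toList = true := by simpa using hb
          simp [pvBlockRange, pvBlockInterval, hb2]
        · have hb2 : PySem.Chars.isIn ['-'] b.toList = false := by simpa using hb
          simp [pvBlockRange, pvBlockInterval, hb2, PySem.List.pyRange_one_singleton]
      have hnd := PySem.List.nodup_pyRange_one
        (a := (pvBlockInterval b).1) (b := (pvBlockInterval b).2 + 1)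
      obtain ⟨h2, h1⟩ := innerA _ hnd S L
      have hmem : ∀ x, (decide (x ∈ PySem.List.pyRange (pvBlockInterval b).1
          ((pvBlockInterval b).2 + 1) 1) : Bool)
          = (decide ((pvBlockInterval b).1 ≤ x) && decide (x ≤ (pvBlockInterval b).2)) := by
        intro x
        simp [PySem.List.mem_pyRange_one, Int.lt_add_one_iff]
      simp only [List.foldl_cons, hstep]
      rw [ih (P ++ [pvBlockInterval b]) _ _ (by
        intro x
        rw [h1 x, hS x, covered_append, hmem x])]
      rw [h2]
      have : (PySem.List.pyRange (pvBlockInterval b).1 ((pvBlockInterval b).2 + 1) 1).filter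
          (fun n => !PySem.Set.contains S n)
          = (PySem.List.pyRange (pvBlockInterval b).1 ((pvBlockInterval b).2 + 1) 1).filter
          (fun n => !pvCovered P n) := by
        exact List.filter_congr (by intro m _; rw [hS m])
      rw [this]
      simp [specGo]

-- B's appending parse loop builds the map of pvBlockInterval
theorem parseB (blocks : List String) (acc : List (Int × Int)) :
    blocks.foldl (fun acc block => acc ++ [pvBlockInterval block]) acc
      = acc ++ blocks.map pvBlockInterval := by
  induction blocks generalizing acc with
  | nil => simp
  | cons b bs ih => simp [ih]

-- B's outer fold over the enumerated intervals equals specGo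
theorem outerB (full : List (Int × Int)) (suffix P : List (Int × Int)) (res : List Int)
    (hfull : full = P ++ suffix) :
    (PySem.List.enumerate suffix (P.length : Int)).foldl
      (fun res kp =>
        (PySem.List.pyRange kp.2.1 (kp.2.2 + 1) 1).foldl
          (fun r n => if !pvCovered (full.take kp.1.toNat) n then r ++ [n] else r) res) res
    = res ++ specGo P suffix := by
  induction suffix generalizing P res with
  | nil => simp [specGo]
  | cons p ps ih =>
      rw [PySem.List.enumerate_cons]
      simp only [List.foldl_cons]
      have htake : full.take ((P.length : Int)).toNat = P := by
        rw [hfull, Int.toNat_natCast, List.take_left]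
      rw [PySem.List.foldl_append_if_eq_filter]
      have hlen : ((P.length : Int) + 1) = ((P ++ [p]).length : Int) := by
        simp
      rw [htake, hlen, ih (P ++ [p]) _ (by simp [hfull])]
      simp [specGo]

-- ===== VERDICT (by name: the statement is the Claim_ definition above) =====
theorem parser_chapter_str_spec : Claim_equal_parser_chapter_str := by
  intro chapter_str last_chapter_number is_all _ _
  unfold Spec_parser_chapter_str parser_chapter_str parser_chapter_str_alt
  by_cases h1 : is_all = some true
  · simp [h1]
  · simp only [h1, ite_false]
    cases hp : PySem.Int.ofStr? chapter_str with
    | some n => rfl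
    | none =>
        simp only []
        rw [parseB, List.nil_append]
        have hB := outerB (((PySem.Str.split? chapter_str ",").getD []).map pvBlockInterval)
          (((PySem.Str.split? chapter_str ",").getD []).map pvBlockInterval) [] [] (by simp)
        simp only [List.length_nil, Nat.cast_zero, List.nil_append] at hB
        rw [hB]
        rw [outerA _ [] PySem.Set.empty [] (by intro x; simp [PySem.Set.empty, pvCovered,
          PySem.Set.contains])]
        simp
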